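-- pv_equiv track=rewrite | github.com/matheusfly/AI-Obsidian-API | services/data-pipeline/src/search/search_service.py | _generate_content_preview
-- ===== SOURCE A (Python) =====
-- def _generate_content_preview(content: str, query: str, max_length: int = 200) -> str:
--     """Generate content preview highlighting query terms"""
--     if len(content) <= max_length:
--         return content
--
--     # Find query terms in content
--     query_lower = query.lower()
--     content_lower = content.lower()
--
--     # Find the best position to start the preview
--     best_position = 0
--     max_matches = 0
--
--     for i in range(len(content) - max_length + 1):
--         snippet = content_lower[i:i + max_length]
--         matches = sum(1 for word in query_lower.split() if word in snippet)
--         if matches > max_matches: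
--             max_matches = matches
--             best_position = i
--
--     # Generate preview
--     preview = content[best_position:best_position + max_length]
--
--     # Add ellipsis if needed
--     if best_position > 0:
--         preview = "..." + preview
--     if best_position + max_length < len(content):
--         preview = preview + "..."
--
--     return preview
-- ===== SOURCE B (Python) =====
-- def _generate_content_preview(content: str, query: str, max_length: int = 200) -> str:
--     """Generate content preview highlighting query terms.
--
--     Same result as the brute-force version, but instead of substring-searching
--     every word in every candidate window, it builds one prefix-sum table of
--     occurrence starts per word and sweeps the window starts once.
--     """
--     n = len(content)
--     if n <= max_length:
--         return content
--
--     content_lower = content.lower()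
--     words = query.lower().split()
--     num_starts = n - max_length + 1
--
--     counts = [0] * num_starts
--     for w in words:
--         m = len(w)
--         if m > max_length:
--             continue  # w can never fit inside a window
--         # pref[k] = number of occurrences of w starting at positions < k
--         pref = [0]
--         acc = 0
--         for p in range(n):
--             if content_lower.startswith(w, p):
--                 acc += 1
--             pref.append(acc)
--         span = max_length - m + 1
--         counts = [counts[i] + (1 if pref[i + span] - pref[i] > 0 else 0)
--                   for i in range(num_starts)]
--
--     best_position = counts.index(max(counts))
--
--     preview = content[best_position:best_position + max_length]
--     if best_position > 0:
--         preview = "..." + preview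
--     if best_position + max_length < n:
--         preview = preview + "..."
--     return preview
-- ===== Notes on version B (the rewrite author's own statement) =====
-- stated objective: faster
-- what changed: Instead of slicing every candidate window and substring-searching each query word in it (O(n*max_length*words*|w|)), B builds one prefix-sum table of occurrence starts per word and sweeps the window starts once, then takes the first argmax via index(max(counts)).
-- outside the precondition, e.g. on _generate_content_preview('aba', 'b', -2): A returns '...b...', B returns 'a...'
import Mathlib
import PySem

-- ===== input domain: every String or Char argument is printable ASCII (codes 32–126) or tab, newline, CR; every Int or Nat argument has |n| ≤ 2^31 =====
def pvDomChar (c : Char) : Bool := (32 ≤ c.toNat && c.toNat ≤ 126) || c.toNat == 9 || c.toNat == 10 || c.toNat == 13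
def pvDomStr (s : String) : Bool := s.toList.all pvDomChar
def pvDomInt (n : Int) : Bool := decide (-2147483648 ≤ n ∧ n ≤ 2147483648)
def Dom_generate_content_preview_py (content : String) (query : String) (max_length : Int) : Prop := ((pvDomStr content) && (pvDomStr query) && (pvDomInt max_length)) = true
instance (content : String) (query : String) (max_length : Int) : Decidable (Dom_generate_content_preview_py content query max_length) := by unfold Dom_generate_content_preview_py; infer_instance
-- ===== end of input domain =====

-- B replaces A's per-window slice-and-substring-search by one per-word prefix-sum table of
-- occurrence starts and a single sweep of the window starts (objective: faster, asymptotically).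

-- ===== PORT A =====
-- Python 'str + str' (used by both Pythons for the "..." ellipses); exact
def pvConcat (a b : String) : String := String.ofList (a.toList ++ b.toList)

-- the last five lines of BOTH Pythons are textually identical; shared transliteration:
-- preview = content[best_position:best_position+max_length], then add the ellipses
def pvPreviewTail (content : String) (max_length best_position : Int) : String :=
  let preview := PySem.Str.slice content (some best_position) (some (best_position + max_length))
  let preview := if best_position > 0 then pvConcat (String.ofList ['.', '.', '.']) preview else preview
  let preview := if best_position + max_length < PySem.Str.len content then pvConcat preview (String.ofList ['.', '.', '.']) else preview
  preview

def generate_content_preview_py (content : String) (query : String) (max_length : Int) : String :=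
  if PySem.Str.len content ≤ max_length then content
  else
    let query_lower := PySem.Str.lower query
    let content_lower := PySem.Str.lower content
    -- for i in range(len(content) - max_length + 1): state = (best_position, max_matches)
    let st :=
      (PySem.List.pyRange 0 (PySem.Str.len content - max_length + 1)).foldl
        (fun (st : Int × Int) i =>
          let snippet := PySem.Str.slice content_lower (some i) (some (i + max_length))
          let matchCount : Int :=
            (PySem.Str.split₀ query_lower).foldl
              (fun acc word => if PySem.Str.isIn word snippet then acc + 1 else acc) 0
          if matchCount > st.2 then (i, matchCount) else st)
        ((0 : Int), (0 : Int))
    pvPreviewTail content max_length st.1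

-- ===== PORT B =====
def generate_content_preview_py_alt (content : String) (query : String) (max_length : Int) : String :=
  let n := PySem.Str.len content
  if n ≤ max_length then content
  else
    let content_lower := PySem.Str.lower content
    let words := PySem.Str.split₀ (PySem.Str.lower query)
    let num_starts := n - max_length + 1
    let counts0 : List Int := List.replicate num_starts.toNat 0
    let counts := words.foldl (fun (counts : List Int) w =>
      if PySem.Str.len w > max_length then counts
      else
        -- pref = [0]; acc = 0; for p in range(n): acc += startswith; pref.append(acc)
        -- content_lower.startswith(w, p) with 0 ≤ p is exact as startswith on content_lower[p:]
        let pr :=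
          (PySem.List.pyRange 0 n).foldl
            (fun (st : List Int × Int) p =>
              let acc := if PySem.Str.startswith (PySem.Str.slice content_lower (some p) none) w
                         then st.2 + 1 else st.2
              (st.1 ++ [acc], acc))
            (([0] : List Int), (0 : Int))
        let pref := pr.1
        let span := max_length - PySem.Str.len w + 1
        -- counts = [counts[i] + (1 if pref[i+span]-pref[i] > 0 else 0) for i in range(num_starts)]
        -- (both indices are in range here, so pyGetD is exact for Python's counts[i]/pref[k])
        (PySem.List.pyRange 0 num_starts).map (fun i =>
          PySem.List.pyGetD counts i 0 +
            (if 0 < PySem.List.pyGetD pref (i + span) 0 - PySem.List.pyGetD pref i 0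
             then 1 else 0)))
      counts0
    -- best_position = counts.index(max(counts)); counts is nonempty here, so max? and index?
    -- always return some and the '.getD 0' default is never taken (Python raises on neither call)
    let best_position : Int :=
      ((((PySem.List.max? counts id).bind
          (fun mx => PySem.List.index? counts mx)).getD 0 : Nat) : Int)
    pvPreviewTail content max_length best_position

-- ===== PRECONDITION & SPEC =====
-- Pre_ excludes negative max_length, outside the preview function's natural domain: there A's
-- slice stop i+max_length is negative and wraps around Python-style, so A scores words against
-- accidental wrapped-around windows; B does the natural thing (no window can hold any word).
def Pre_generate_content_preview_py (content : String) (query : String) (max_length : Int) : Prop :=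
  0 ≤ max_length
instance (content : String) (query : String) (max_length : Int) : Decidable (Pre_generate_content_preview_py content query max_length) := by unfold Pre_generate_content_preview_py; infer_instance

def pvWitness_generate_content_preview_py : String × String × Int := ("hello world, hello moon", "world", 10)

def Spec_generate_content_preview_py (content : String) (query : String) (max_length : Int) (out : String) : Prop := out = generate_content_preview_py_alt content query max_length
instance (content : String) (query : String) (max_length : Int) (out : String) : Decidable (Spec_generate_content_preview_py content query max_length out) := by unfold Spec_generate_content_preview_py; infer_instance

-- ===== CLAIM (what is proved, stated in full; the proofs are below) =====
def Claim_equal_generate_content_preview_py : Prop := ∀ (content : String) (query : String) (max_length : Int), Dom_generate_content_preview_py content query max_length → Pre_generate_content_preview_py content query max_length → Spec_generate_content_preview_py content query max_length (generate_content_preview_py content query max_length)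

-- ===== LEMMAS AND PROOFS =====

-- 'word fits in the window starting at i': the condition both programs score
def pvWinP (cl : List Char) (L : Nat) (w : List Char) (i : Nat) : Bool :=
  PySem.Chars.isIn w ((cl.drop i).take L)

def pvCount (cl : List Char) (ws : List String) (L i : Nat) : Int :=
  ((ws.countP (fun w => pvWinP cl L w.toList i) : Nat) : Int)

lemma pvWinP_iff (cl w : List Char) (i L : Nat) :
    pvWinP cl L w i = true ↔ ∃ p : Nat, i ≤ p ∧ p + w.length ≤ i + L ∧ w <+: cl.drop p := by
  unfold pvWinP
  rw [← PySem.Chars.exists_prefix_drop_iff_isIn]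
  by_cases hw : w = []
  · subst hw
    constructor
    · intro _; exact ⟨i, le_rfl, by simp, List.nil_prefix⟩
    · intro _; exact ⟨0, List.nil_prefix⟩
  · have hw0 : 0 < w.length := List.length_pos_iff.2 hw
    constructor
    · rintro ⟨j, hj⟩
      rw [List.drop_take, List.drop_drop] at hj
      have h1 : w <+: cl.drop (i + j) := hj.trans (List.take_prefix _ _)
      have h2 := hj.length_le
      rw [List.length_take] at h2
      have h3 : w.length ≤ L - j := le_trans h2 (min_le_left _ _)
      exact ⟨i + j, by omega, by omega, h1⟩
    · rintro ⟨p, hip, hlen, hpre⟩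
      refine ⟨p - i, ?_⟩
      rw [List.drop_take, List.drop_drop]
      have hp : i + (p - i) = p := by omega
      rw [hp]
      exact List.prefix_take_iff.2 ⟨hpre, by omega⟩

lemma pvWinP_false (cl w : List Char) (i L : Nat) (h : L < w.length) :
    pvWinP cl L w i = false := by
  unfold pvWinP
  rw [PySem.Chars.isIn_eq_false_iff]
  intro hin
  have := hin.length_le
  rw [List.length_take] at this
  omega

lemma split₀_go_ne_nil : ∀ (s cur : List Char) (acc : List (List Char)),
    (∀ w ∈ acc, w ≠ []) → ∀ w ∈ PySem.Chars.split₀.go s cur acc, w ≠ [] := by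
  intro s
  induction s with
  | nil =>
    intro cur acc hacc w hw
    by_cases hc : cur.isEmpty
    · simp only [PySem.Chars.split₀.go, hc, if_pos, List.mem_reverse] at hw
      exact hacc w hw
    · simp only [PySem.Chars.split₀.go, hc, if_neg, Bool.false_eq_true, not_false_iff,
        List.mem_reverse, List.mem_cons] at hw
      rcases hw with h | h
      · subst h
        simp only [ne_eq, List.reverse_eq_nil_iff]
        intro hnil
        rw [hnil] at hc
        simp at hc
      · exact hacc w h
  | cons c rest ih =>
    intro cur acc hacc w hw
    by_cases hsp : PySem.Chars.isspace c
    · by_cases hc : cur.isEmpty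
      · simp only [PySem.Chars.split₀.go, hsp, hc, if_pos] at hw
        exact ih [] acc hacc w hw
      · simp only [PySem.Chars.split₀.go, hsp, hc, if_pos, Bool.false_eq_true, if_neg,
          not_false_iff] at hw
        refine ih [] (cur.reverse :: acc) ?_ w hw
        intro w' hw'
        rcases List.mem_cons.1 hw' with h | h
        · subst h
          simp only [ne_eq, List.reverse_eq_nil_iff]
          intro hnil
          rw [hnil] at hc
          simp at hc
        · exact hacc w' h
    · simp only [PySem.Chars.split₀.go, hsp, Bool.false_eq_true, if_neg, not_false_iff] at hw
      exact ih (c :: cur) acc hacc w hw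

lemma mem_split₀_ne_nil (q : String) : ∀ word ∈ PySem.Str.split₀ q, word.toList ≠ [] := by
  intro word hw
  have hmem : word.toList ∈ List.map String.toList (PySem.Str.split₀ q) :=
    List.mem_map_of_mem hw
  rw [PySem.Str.split₀_map_toList] at hmem
  exact split₀_go_ne_nil q.toList [] [] (by simp) word.toList
    (by simpa [PySem.Chars.split₀] using hmem)

lemma pyRange_zero_natCast (K : Nat) :
    PySem.List.pyRange 0 (K : Int) = (List.range K).map (fun k : Nat => (k : Int)) := by
  induction K with
  | zero => simp [PySem.List.pyRange_one_eq_nil]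
  | succ K ih =>
    have hcast : ((K + 1 : Nat) : Int) = (K : Int) + 1 := by push_cast; ring
    rw [hcast, PySem.List.pyRange_one_succ_right (by positivity), ih]
    simp [List.range_succ]

lemma pref_fold (hit : Nat → Bool) (K : Nat) :
    (List.range K).foldl
      (fun (st : List Int × Int) p =>
        (st.1 ++ [if hit p then st.2 + 1 else st.2], if hit p then st.2 + 1 else st.2))
      (([0] : List Int), (0 : Int))
    = ((List.range (K + 1)).map (fun k => (((List.range k).countP hit : Nat) : Int)),
       (((List.range K).countP hit : Nat) : Int)) := by
  induction K with
  | zero => simp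
  | succ K ih =>
    rw [List.range_succ, List.foldl_append, ih]
    have hc : (List.range (K + 1)).countP hit
        = (List.range K).countP hit + (if hit K then 1 else 0) := by
      rw [List.range_succ, List.countP_append]
      simp [List.countP_cons]
    rw [show List.range (K + 1 + 1) = List.range (K + 1) ++ [K + 1] from List.range_succ,
      List.map_append]
    cases h : hit K <;> simp [h, hc, List.foldl_cons]

lemma diff_pos_iff (hit : Nat → Bool) (i s : Nat) :
    (0 < (((List.range (i + s)).countP hit : Nat) : Int)
        - (((List.range i).countP hit : Nat) : Int))
    ↔ ∃ p, i ≤ p ∧ p < i + s ∧ hit p = true := by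
  rw [List.range_add, List.countP_append, List.countP_map]
  push_cast
  rw [show ((List.range i).countP hit : Int) + ((List.range s).countP (hit ∘ (i + ·)) : Int)
      - ((List.range i).countP hit : Int) = ((List.range s).countP (hit ∘ (i + ·)) : Int) by ring]
  rw [Int.natCast_pos, Nat.pos_iff_ne_zero, Ne, List.countP_eq_zero]
  push Not
  constructor
  · rintro ⟨x, hx, hhit⟩
    exact ⟨i + x, by omega, by simp at hx; omega, hhit⟩
  · rintro ⟨p, hip, hps, hhit⟩
    exact ⟨p - i, by simp; omega, by simpa [Function.comp, Nat.add_sub_cancel' hip] using hhit⟩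

-- B's per-word sweep over an accumulated counts list equals adding the window indicator
lemma counts_fold (cl : List Char) (L n W : Nat) (hL : L < n)
    (hW : W = n - L + 1) (ml : Int) (hml : ml = (L : Int)) :
    ∀ (ws : List String) (f : Nat → Int), (∀ w ∈ ws, w.toList ≠ []) →
      ws.foldl
        (fun (counts : List Int) w =>
          if ((w.toList.length : Int)) > ml then counts
          else
            (List.range W).map (fun i =>
              PySem.List.pyGetD counts ((i : Nat) : Int) 0 +
                (if 0 < PySem.List.pyGetD
                        ((List.range (n + 1)).map
                          (fun k => (((List.range k).countP
                            (fun p => PySem.Chars.startswith (cl.drop p) w.toList) : Nat) : Int)))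
                        (((i : Nat) : Int) + (ml - (w.toList.length : Int) + 1)) 0
                      - PySem.List.pyGetD
                        ((List.range (n + 1)).map
                          (fun k => (((List.range k).countP
                            (fun p => PySem.Chars.startswith (cl.drop p) w.toList) : Nat) : Int)))
                        ((i : Nat) : Int) 0
                 then 1 else 0)))
        ((List.range W).map f)
      = (List.range W).map (fun i => f i + pvCount cl ws L i) := by
  intro ws
  induction ws with
  | nil =>
    intro f _
    simp [pvCount]
  | cons w ws ih =>
    intro f hne
    have hwne : w.toList ≠ [] := hne w (List.mem_cons_self)
    have hm0 : 0 < w.toList.length := List.length_pos_iff.2 hwne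
    rw [List.foldl_cons]
    by_cases hskip : ((w.toList.length : Int)) > ml
    · rw [if_pos hskip]
      rw [ih f (fun w' hw' => hne w' (List.mem_cons_of_mem _ hw'))]
      apply List.map_congr_left
      intro i _
      have hfalse : pvWinP cl L w.toList i = false :=
        pvWinP_false cl w.toList i L (by omega)
      simp [pvCount, hfalse]
    · rw [if_neg hskip]
      have hmL : w.toList.length ≤ L := by omega
      have hstep :
          (List.range W).map (fun i =>
            PySem.List.pyGetD ((List.range W).map f) ((i : Nat) : Int) 0 +
              (if 0 < PySem.List.pyGetD
                      ((List.range (n + 1)).map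
                        (fun k => (((List.range k).countP
                          (fun p => PySem.Chars.startswith (cl.drop p) w.toList) : Nat) : Int)))
                      (((i : Nat) : Int) + (ml - (w.toList.length : Int) + 1)) 0
                    - PySem.List.pyGetD
                      ((List.range (n + 1)).map
                        (fun k => (((List.range k).countP
                          (fun p => PySem.Chars.startswith (cl.drop p) w.toList) : Nat) : Int)))
                      ((i : Nat) : Int) 0
               then 1 else 0))
          = (List.range W).map (fun i => f i + (if pvWinP cl L w.toList i then 1 else 0)) := by
        apply List.map_congr_left
        intro i hi
        rw [List.mem_range] at hi
        have h1 : PySem.List.pyGetD ((List.range W).map f) ((i : Nat) : Int) 0 = f i := by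
          rw [PySem.List.pyGetD_map_natCast f (List.range W) i 0 (by simpa using hi)]
          simp
        set hit := fun p => PySem.Chars.startswith (cl.drop p) w.toList with hhit
        set m := w.toList.length with hmdef
        have hidx : (((i : Nat) : Int) + (ml - (m : Int) + 1))
            = (((i + (L - m + 1) : Nat)) : Int) := by
          push_cast [hml]
          omega
        have hb1 : i + (L - m + 1) < (List.range (n + 1)).length := by
          simp only [List.length_range]
          omega
        have hb2 : i < (List.range (n + 1)).length := by
          simp only [List.length_range]
          omega
        have h2 : PySem.List.pyGetD
            ((List.range (n + 1)).map (fun k => (((List.range k).countP hit : Nat) : Int)))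
            (((i : Nat) : Int) + (ml - (m : Int) + 1)) 0
            = (((List.range (i + (L - m + 1))).countP hit : Nat) : Int) := by
          rw [hidx, PySem.List.pyGetD_map_natCast _ _ _ _ hb1]
          simp
        have h3 : PySem.List.pyGetD
            ((List.range (n + 1)).map (fun k => (((List.range k).countP hit : Nat) : Int)))
            ((i : Nat) : Int) 0
            = (((List.range i).countP hit : Nat) : Int) := by
          rw [PySem.List.pyGetD_map_natCast _ _ _ _ hb2]
          simp
        rw [h1, h2, h3]
        congr 1
        have hiff : (0 < (((List.range (i + (L - m + 1))).countP hit : Nat) : Int)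
            - (((List.range i).countP hit : Nat) : Int)) ↔ pvWinP cl L w.toList i = true := by
          rw [diff_pos_iff hit i (L - m + 1), pvWinP_iff]
          constructor
          · rintro ⟨p, h4, h5, h6⟩
            exact ⟨p, h4, by omega, (PySem.Chars.startswith_iff _ _).1 h6⟩
          · rintro ⟨p, h4, h5, h6⟩
            exact ⟨p, h4, by omega, (PySem.Chars.startswith_iff _ _).2 h6⟩
        rw [if_congr hiff rfl rfl]
      rw [hstep, ih _ (fun w' hw' => hne w' (List.mem_cons_of_mem _ hw'))]
      apply List.map_congr_left
      intro i _
      simp only [pvCount, List.countP_cons]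
      push_cast
      cases h : pvWinP cl L w.toList i
      · simp
      · simp
        ring

-- A's strict-improvement scan returns the first index attaining the maximum
lemma afold_spec (g : Nat → Int) (hg : ∀ i, 0 ≤ g i) :
    ∀ K, 0 < K →
      ∃ j, j < K ∧
        ((List.range K).foldl
          (fun (st : Int × Int) k => if g k > st.2 then ((k : Int), g k) else st)
          ((0 : Int), (0 : Int))) = ((j : Int), g j) ∧
        (∀ y, y < K → g y ≤ g j) ∧ (∀ j', j' < j → g j' < g j) := by
  intro K
  induction K with
  | zero => omega
  | succ K ih =>
    intro _
    by_cases hK : K = 0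
    · subst hK
      refine ⟨0, by omega, ?_, ?_, ?_⟩
      · by_cases h0 : g 0 > 0
        · simp [h0]
        · have : g 0 = 0 := le_antisymm (by omega) (hg 0)
          simp [this]
      · intro y hy
        interval_cases y
        exact le_rfl
      · intro j' hj'
        omega
    · obtain ⟨j, hjK, hfold, hmax, hfirst⟩ := ih (by omega)
      rw [List.range_succ, List.foldl_append, hfold, List.foldl_cons, List.foldl_nil]
      by_cases hgt : g K > g j
      · refine ⟨K, by omega, by simp [hgt], ?_, ?_⟩
        · intro y hy
          by_cases hyK : y = K
          · subst hyK; exact le_rfl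
          · exact le_trans (hmax y (by omega)) (le_of_lt hgt)
        · intro j' hj'
          exact lt_of_le_of_lt (hmax j' hj') hgt
      · refine ⟨j, by omega, by simp [hgt], ?_, hfirst⟩
        intro y hy
        by_cases hyK : y = K
        · subst hyK; omega
        · exact hmax y (by omega)

-- B's counts.index(max(counts)) is the same first-argmax
lemma bmax_spec (g : Nat → Int) (K : Nat) (j : Nat) (hj : j < K)
    (hmax : ∀ y, y < K → g y ≤ g j) (hfirst : ∀ j', j' < j → g j' < g j) :
    ((((PySem.List.max? ((List.range K).map g) id).bind
        (fun mx => PySem.List.index? ((List.range K).map g) mx)).getD 0 : Nat) : Int)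
    = (j : Int) := by
  set vs := (List.range K).map g with hvs
  have hlen : vs.length = K := by simp [hvs]
  have hget : ∀ (k : Nat) (hk : k < vs.length), vs[k] = g k := by
    intro k hk
    simp [hvs]
  cases hm : PySem.List.max? vs id with
  | none =>
    exfalso
    rw [PySem.List.max?_eq_none_iff] at hm
    rw [hm] at hlen
    simp at hlen
    omega
  | some mx =>
    have hmem : mx ∈ vs := PySem.List.max?_mem hm
    have hisMax := PySem.List.max?_isMax hm
    have hmx : mx = g j := by
      obtain ⟨k, hk, hkv⟩ := List.getElem_of_mem hmem
      have h1 : mx ≤ g j := by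
        rw [← hkv, hget k hk]
        exact hmax k (by omega)
      have h2 : g j ≤ mx := by
        have : g j ∈ vs := by
          rw [hvs]
          exact List.mem_map_of_mem (List.mem_range.2 hj)
        simpa using hisMax _ this
      omega
    have hbind : (some mx).bind (fun mx => PySem.List.index? vs mx)
        = PySem.List.index? vs mx := rfl
    rw [hbind]
    cases hi : PySem.List.index? vs mx with
    | none =>
      exfalso
      rw [PySem.List.index?_eq_none_iff] at hi
      exact hi hmem
    | some k =>
      obtain ⟨hk, hkv, hkfirst⟩ := PySem.List.getElem_of_index?_eq_some hi
      have hgk : g k = mx := by rw [← hget k hk, hkv]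
      have hkj : k = j := by
        rcases lt_trichotomy k j with h | h | h
        · exfalso
          have := hfirst k h
          omega
        · exact h
        · exfalso
          have hjlt : j < vs.length := by omega
          have := hkfirst j h
          rw [hget j hjlt] at this
          exact this (by omega)
      subst hkj
      simp

-- canonical first-argmax position both ports compute
def pvBest (content query : String) (ml : Int) : Int :=
  ((List.range (content.toList.length - ml.toNat + 1)).foldl
    (fun (st : Int × Int) k =>
      if pvCount (PySem.Chars.lower content.toList) (PySem.Str.split₀ (PySem.Str.lower query))
            ml.toNat k > st.2
      then ((k : Int),
            pvCount (PySem.Chars.lower content.toList) (PySem.Str.split₀ (PySem.Str.lower query))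
              ml.toNat k)
      else st)
    ((0 : Int), (0 : Int))).1

lemma matchesA_eq (content query : String) (ml : Int) (hml : 0 ≤ ml) (k : Nat) :
    ((PySem.Str.split₀ (PySem.Str.lower query)).foldl
      (fun acc word =>
        if PySem.Str.isIn word
            (PySem.Str.slice (PySem.Str.lower content) (some (k : Int)) (some ((k : Int) + ml)))
        then acc + 1 else acc) (0 : Int))
    = pvCount (PySem.Chars.lower content.toList) (PySem.Str.split₀ (PySem.Str.lower query))
        ml.toNat k := by
  have hL : ml = (ml.toNat : Int) := by omega
  have hsnip : (PySem.Str.slice (PySem.Str.lower content) (some (k : Int))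
        (some ((k : Int) + ml))).toList
      = ((PySem.Chars.lower content.toList).drop k).take ml.toNat := by
    rw [PySem.Str.toList_slice, PySem.Str.toList_lower, PySem.Chars.slice_eq_listSlice, hL,
      PySem.List.slice_natCast_add, Int.toNat_natCast]
  rw [PySem.List.foldl_if_add_one
    (fun word => PySem.Str.isIn word
      (PySem.Str.slice (PySem.Str.lower content) (some (k : Int)) (some ((k : Int) + ml)))),
    zero_add]
  unfold pvCount
  congr 1
  apply List.countP_congr
  intro word _
  rw [PySem.Str.isIn_eq, hsnip]
  rfl

lemma portA_eval (content query : String) (ml : Int) (hml : 0 ≤ ml)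
    (hle : ¬ PySem.Str.len content ≤ ml) :
    generate_content_preview_py content query ml
      = pvPreviewTail content ml (pvBest content query ml) := by
  have hlen := PySem.Str.len_eq content
  have hrange : PySem.Str.len content - ml + 1
      = ((content.toList.length - ml.toNat + 1 : Nat) : Int) := by
    rw [hlen]
    rw [hlen] at hle
    omega
  simp only [generate_content_preview_py]
  rw [if_neg hle]
  rw [hrange, pyRange_zero_natCast, List.foldl_map]
  simp only [matchesA_eq content query ml hml]
  rfl

set_option maxHeartbeats 1000000 in
lemma portB_eval (content query : String) (ml : Int) (hml : 0 ≤ ml)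
    (hle : ¬ PySem.Str.len content ≤ ml) :
    generate_content_preview_py_alt content query ml
      = pvPreviewTail content ml (pvBest content query ml) := by
  have hlen := PySem.Str.len_eq content
  have hL : ml = (ml.toNat : Int) := by omega
  have hlt : ml.toNat < content.toList.length := by
    rw [hlen] at hle
    omega
  have hrange : PySem.Str.len content - ml + 1
      = ((content.toList.length - ml.toNat + 1 : Nat) : Int) := by
    rw [hlen]
    omega
  have h0 : (PySem.Str.len content - ml + 1).toNat
      = content.toList.length - ml.toNat + 1 := by
    rw [hlen]
    omega
  have hrep : List.replicate (content.toList.length - ml.toNat + 1) (0 : Int)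
      = (List.range (content.toList.length - ml.toNat + 1)).map (fun _ => (0 : Int)) := by
    simp
  simp only [generate_content_preview_py_alt]
  rw [if_neg hle]
  rw [h0, hrep, hrange, hlen]
  simp only [PySem.Str.len_eq, PySem.Str.startswith_eq, PySem.Str.toList_slice,
    PySem.Str.toList_lower, PySem.Chars.slice_eq_listSlice, PySem.List.slice_from_natCast,
    pyRange_zero_natCast, List.foldl_map, List.map_map, Function.comp_def]
  simp only [pref_fold]
  rw [counts_fold (PySem.Chars.lower content.toList) ml.toNat content.toList.length
      (content.toList.length - ml.toNat + 1) hlt rfl ml hL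
      (PySem.Str.split₀ (PySem.Str.lower query)) (fun _ => 0)
      (mem_split₀_ne_nil (PySem.Str.lower query))]
  simp only [zero_add]
  obtain ⟨j, hjW, hfold, hmax, hfirst⟩ :=
    afold_spec (fun k => pvCount (PySem.Chars.lower content.toList)
        (PySem.Str.split₀ (PySem.Str.lower query)) ml.toNat k)
      (fun i => by unfold pvCount; exact Int.natCast_nonneg _)
      (content.toList.length - ml.toNat + 1) (by omega)
  rw [bmax_spec _ _ j hjW hmax hfirst]
  unfold pvBest
  rw [hfold]

-- ===== VERDICT (by name: the statement is the Claim_ definition above) =====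
theorem generate_content_preview_py_spec : Claim_equal_generate_content_preview_py := by
  intro content query ml _hdom hpre
  unfold Spec_generate_content_preview_py
  by_cases hle : PySem.Str.len content ≤ ml
  · simp only [generate_content_preview_py, generate_content_preview_py_alt, if_pos hle]
  · rw [portA_eval content query ml hpre hle, portB_eval content query ml hpre hle]
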